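-- pv_equiv track=rewrite | github.com/mriganv/Project-3 | static/model/app.py | skill_check
-- ===== SOURCE A (Python) =====
-- def skill_check(dict):
--     v=dict.values()
--     skill_dict={
--     'Python':0, 'R':0, 'SQL':0, 'AWS':0, 'Excel':0, 'GCP':0, 'Azure':0, 'Spark':0,
--         'Tableau':0, 'Keras':0, 'NoSQL':0, 'AI':0,
--        'Machine_Learning':0, 'Hadoop':0, "Power BI":0
--     }
--     for i in v:
--         if (i in skill_dict.keys()):
--             skill_dict[i]=1
--     return skill_dict
-- ===== SOURCE B (Python) =====
-- SKILLS = ['Python', 'R', 'SQL', 'AWS', 'Excel', 'GCP', 'Azure', 'Spark',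
--           'Tableau', 'Keras', 'NoSQL', 'AI', 'Machine_Learning', 'Hadoop', 'Power BI']
--
-- def skill_check(dict):
--     present = set(dict.values())
--     return {s: (1 if s in present else 0) for s in SKILLS}
-- ===== Notes on version B (the rewrite author's own statement) =====
-- stated objective: idiomatic
-- what changed: Inverts the traversal: builds a set of the input values once, then a dict comprehension over the fixed 15 skill names marks each 1/0, instead of mutating a counter dict while looping over the values.
import Mathlib
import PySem

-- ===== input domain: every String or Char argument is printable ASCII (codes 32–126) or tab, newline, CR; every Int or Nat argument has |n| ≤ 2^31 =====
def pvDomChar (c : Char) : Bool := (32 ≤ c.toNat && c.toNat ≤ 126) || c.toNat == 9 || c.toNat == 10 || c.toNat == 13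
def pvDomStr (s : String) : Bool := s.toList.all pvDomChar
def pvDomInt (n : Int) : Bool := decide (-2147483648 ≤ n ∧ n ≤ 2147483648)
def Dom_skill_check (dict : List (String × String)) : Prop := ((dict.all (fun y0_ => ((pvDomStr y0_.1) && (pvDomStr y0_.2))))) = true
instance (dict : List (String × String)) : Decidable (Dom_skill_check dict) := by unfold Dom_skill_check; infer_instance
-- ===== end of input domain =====

-- B builds a set of the input values once and maps the fixed skill list to 1/0; one honest line: same result, inverted traversal.

-- ===== PORT A =====
-- the literal initial dict of A
def pvSkillDict0 : PySem.Dict String Int :=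
  PySem.Dict.ofList [("Python", 0), ("R", 0), ("SQL", 0), ("AWS", 0), ("Excel", 0),
    ("GCP", 0), ("Azure", 0), ("Spark", 0), ("Tableau", 0), ("Keras", 0),
    ("NoSQL", 0), ("AI", 0), ("Machine_Learning", 0), ("Hadoop", 0), ("Power BI", 0)]

def skill_check (dict : List (String × String)) : List (String × Int) :=
  -- v = dict.values(); for i in v: if i in skill_dict.keys(): skill_dict[i] = 1
  ((dict.map Prod.snd).foldl
    (fun d i => if i ∈ d.keys then d.insert i 1 else d) pvSkillDict0).items

-- ===== PORT B =====
def pvSkills : List String :=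
  ["Python", "R", "SQL", "AWS", "Excel", "GCP", "Azure", "Spark",
   "Tableau", "Keras", "NoSQL", "AI", "Machine_Learning", "Hadoop", "Power BI"]

def skill_check_alt (dict : List (String × String)) : List (String × Int) :=
  let present : PySem.Set String := PySem.Set.ofList (dict.map Prod.snd)
  pvSkills.map (fun s => (s, if s ∈ present then (1 : Int) else 0))

-- ===== PRECONDITION & SPEC =====
def Spec_skill_check (dict : List (String × String)) (out : List (String × Int)) : Prop := out = skill_check_alt dict
instance (dict : List (String × String)) (out : List (String × Int)) : Decidable (Spec_skill_check dict out) := by unfold Spec_skill_check; infer_instance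

-- ===== CLAIM (what is proved, stated in full; the proofs are below) =====
def Claim_equal_skill_check : Prop := ∀ (dict : List (String × String)), Dom_skill_check dict → Spec_skill_check dict (skill_check dict)

-- ===== LEMMAS AND PROOFS =====

def pvStep (d : PySem.Dict String Int) (i : String) : PySem.Dict String Int :=
  if i ∈ d.keys then d.insert i 1 else d

lemma pvStep_keys (d : PySem.Dict String Int) (i : String) : (pvStep d i).keys = d.keys := by
  unfold pvStep
  split_ifs with h
  · exact PySem.Dict.keys_insert_of_contains d 1 (by simpa [PySem.Dict.contains_iff_mem_keys] using h)
  · rfl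

lemma pvLoop_keys (vs : List String) (d : PySem.Dict String Int) :
    (vs.foldl pvStep d).keys = d.keys := by
  induction vs generalizing d with
  | nil => rfl
  | cons i vs ih => simp [List.foldl, ih, pvStep_keys]

lemma pvLoop_getD (vs : List String) (d : PySem.Dict String Int) (k : String) :
    (vs.foldl pvStep d).getD k 0 = if k ∈ d.keys ∧ k ∈ vs then 1 else d.getD k 0 := by
  induction vs generalizing d with
  | nil => simp
  | cons i vs ih =>
    rw [List.foldl_cons, ih, pvStep_keys]
    by_cases hkv : k ∈ d.keys ∧ k ∈ vs
    · rw [if_pos hkv, if_pos ⟨hkv.1, List.mem_cons_of_mem i hkv.2⟩]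
    · rw [if_neg hkv]
      by_cases hki : k = i
      · subst hki
        by_cases hk : k ∈ d.keys
        · unfold pvStep
          rw [if_pos hk, PySem.Dict.getD_insert_self, if_pos ⟨hk, List.mem_cons_self⟩]
        · unfold pvStep
          rw [if_neg hk, if_neg (fun h => hk h.1)]
      · have hstep : (pvStep d i).getD k 0 = d.getD k 0 := by
          unfold pvStep
          split_ifs with hi
          · exact PySem.Dict.getD_insert_of_ne d 1 0 hki
          · rfl
        rw [hstep, if_neg (fun h => hkv ⟨h.1, (List.mem_cons.mp h.2).resolve_left hki⟩)]

lemma pvStep_eq (dict : List (String × String)) :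
    skill_check dict = ((dict.map Prod.snd).foldl pvStep pvSkillDict0).items := rfl

-- ===== VERDICT (by name: the statement is the Claim_ definition above) =====
theorem skill_check_spec : Claim_equal_skill_check := by
  intro dict _
  show skill_check dict = skill_check_alt dict
  rw [pvStep_eq]
  set vs := dict.map Prod.snd with hvs
  have hkeys : ((vs.foldl pvStep pvSkillDict0)).keys = pvSkills := by
    rw [pvLoop_keys]; decide
  have hnd : ((vs.foldl pvStep pvSkillDict0)).keys.Nodup := by
    rw [hkeys]; decide
  rw [PySem.Dict.items_eq_map_keys _ hnd 0, hkeys]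
  unfold skill_check_alt
  simp only []
  apply List.map_congr_left
  intro s hs
  refine congrArg (Prod.mk s) ?_
  have hgd : (vs.foldl pvStep pvSkillDict0).getD s 0
      = if s ∈ pvSkillDict0.keys ∧ s ∈ vs then 1 else pvSkillDict0.getD s 0 := pvLoop_getD vs _ s
  have hsk : s ∈ pvSkillDict0.keys := by
    have : pvSkillDict0.keys = pvSkills := by decide
    rw [this]; exact hs
  have hz : pvSkillDict0.getD s 0 = 0 := by
    fin_cases hs <;> decide
  rw [hgd, hz]
  by_cases hv : s ∈ vs
  · rw [if_pos ⟨hsk, hv⟩, if_pos ((PySem.Set.mem_ofList vs s).2 hv)]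
  · rw [if_neg (fun h => hv h.2), if_neg (fun h => hv ((PySem.Set.mem_ofList vs s).1 h))]
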